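-- pv_equiv track=rewrite | github.com/AcademicDodecahedron/CSML | pipelines/scival/nodes/load_records/incites_csv.py | _find_first_csv_line
-- ===== SOURCE A (Python) =====
-- from typing import Iterable, TextIO
--
-- def _find_first_csv_line(file: Iterable[str]):
--     num_empty = 0
--
--     for line in file:
--         if line == "\n":
--             num_empty += 1
--         else:
--             if num_empty >= 2:
--                 return line
--             num_empty = 0
--
--     raise RuntimeError("Couldn't find first line of csv")
-- ===== SOURCE B (Python) =====
-- def _find_first_csv_line(file):
--     # Run-based scan: jump over whole runs of blank / non-blank lines,
--     # remembering the length of the blank run just passed.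
--     lines = list(file)
--     n = len(lines)
--     i = 0
--     prev_blank = 0
--     while i < n:
--         j = i
--         if lines[i] == "\n":
--             while j < n and lines[j] == "\n":
--                 j += 1
--             prev_blank = j - i
--         else:
--             if prev_blank >= 2:
--                 return lines[i]
--             while j < n and lines[j] != "\n":
--                 j += 1
--             prev_blank = 0
--         i = j
--     raise RuntimeError("Couldn't find first line of csv")
-- ===== Notes on version B (the rewrite author's own statement) =====
-- stated objective: alternative
-- what changed: B scans the input as alternating runs of blank/non-blank lines (jumping over each run with inner scans and remembering the blank run's length) instead of A's per-line counter; the not-found RuntimeError input is excluded by Pre_.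
import Mathlib
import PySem

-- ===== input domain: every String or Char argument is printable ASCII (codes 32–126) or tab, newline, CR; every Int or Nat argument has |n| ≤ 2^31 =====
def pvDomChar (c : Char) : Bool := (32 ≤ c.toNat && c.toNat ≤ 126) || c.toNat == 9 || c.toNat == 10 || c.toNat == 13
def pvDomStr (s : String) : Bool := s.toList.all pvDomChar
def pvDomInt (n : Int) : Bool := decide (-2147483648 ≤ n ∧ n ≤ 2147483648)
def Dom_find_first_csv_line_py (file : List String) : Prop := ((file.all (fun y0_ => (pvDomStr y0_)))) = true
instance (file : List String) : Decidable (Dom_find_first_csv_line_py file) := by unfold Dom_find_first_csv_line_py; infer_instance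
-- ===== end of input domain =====

-- ===== PORT A =====
-- B changes no observable behaviour inside Pre_: run-based scan instead of a per-line counter (alternative decomposition).
def goA : Int → List String → Option String
  | _, [] => none
  | n, l :: ls =>
    if l == "\n" then goA (n + 1) ls
    else if 2 ≤ n then some l
    else goA 0 ls

def find_first_csv_line_py (file : List String) : String :=
  (goA 0 file).getD ""

-- ===== PORT B =====
def goB : Int → List String → Option String
  | _, [] => none
  | prev, l :: ls =>
    if l == "\n" then
      goB (1 + ((ls.takeWhile (fun x => x == "\n")).length : Int))
          (ls.dropWhile (fun x => x == "\n"))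
    else if 2 ≤ prev then some l
    else goB 0 (ls.dropWhile (fun x => x != "\n"))
  termination_by _ file => file.length
  decreasing_by
    · exact Nat.lt_succ_of_le (ls.length_dropWhile_le _)
    · exact Nat.lt_succ_of_le (ls.length_dropWhile_le _)

def find_first_csv_line_py_alt (file : List String) : String :=
  (goB 0 file).getD ""

-- ===== PRECONDITION & SPEC =====
-- Pre_ excludes exactly the inputs on which Python A raises RuntimeError (no non-blank line preceded by two blank lines); B raises there too.
def Pre_find_first_csv_line_py (file : List String) : Prop :=
  ∃ j < file.length, 2 ≤ j ∧ file.getD j "" ≠ "\n" ∧ file.getD (j-1) "" = "\n" ∧ file.getD (j-2) "" = "\n"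
instance (file : List String) : Decidable (Pre_find_first_csv_line_py file) := by
  unfold Pre_find_first_csv_line_py; infer_instance
def pvWitness_find_first_csv_line_py : List String := ["\n", "\n", "a,b\n"]
def Spec_find_first_csv_line_py (file : List String) (out : String) : Prop := out = find_first_csv_line_py_alt file
instance (file : List String) (out : String) : Decidable (Spec_find_first_csv_line_py file out) := by unfold Spec_find_first_csv_line_py; infer_instance

-- ===== CLAIM (what is proved, stated in full; the proofs are below) =====
def Claim_equal_find_first_csv_line_py : Prop := ∀ (file : List String), Dom_find_first_csv_line_py file → Pre_find_first_csv_line_py file → Spec_find_first_csv_line_py file (find_first_csv_line_py file)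

-- ===== LEMMAS AND PROOFS =====

-- A's counter just accumulates over a blank prefix.
theorem goA_blanks (ls : List String) (n : Int) :
    goA n ls
      = goA (n + ((ls.takeWhile (fun x => x == "\n")).length : Int))
            (ls.dropWhile (fun x => x == "\n")) := by
  induction ls generalizing n with
  | nil => simp [goA]
  | cons h t ih =>
    by_cases hb : h == "\n"
    · simp [goA, hb]
      rw [ih (n + 1)]
      congr 1
      ring
    · simp [hb]

-- With a zero counter, A just skips a non-blank prefix.
theorem goA_skip (ls : List String) :
    goA 0 ls = goA 0 (ls.dropWhile (fun x => x != "\n")) := by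
  induction ls with
  | nil => rfl
  | cons h t ih =>
    by_cases hb : h = "\n"
    · simp [hb]
    · simp [goA, hb, ih]

theorem goB_eq_goA : ∀ (file : List String) (n : Int),
    (file.head? = some "\n" → n = 0) →
    goB n file = goA n file
  | [], _, _ => by simp [goB, goA]
  | l :: ls, n, h => by
    by_cases hb : l == "\n"
    · have hl : l = "\n" := by simpa using hb
      have hn : n = 0 := h (by simp [hl])
      subst hn; subst hl
      rw [goB, if_pos (by simp)]
      rw [goB_eq_goA (ls.dropWhile (fun x => x == "\n"))
            (1 + ((ls.takeWhile (fun x => x == "\n")).length : Int))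
            (by
              intro hh
              have := List.head?_dropWhile_not (fun x => x == "\n") ls
              rw [hh] at this
              simp at this)]
      have := goA_blanks ls 1
      rw [show goA 0 ("\n" :: ls) = goA 1 ls from by simp [goA], this]
    · by_cases h2 : 2 ≤ n
      · rw [goB, if_neg (by simpa using hb), if_pos h2]
        simp [goA, hb, h2]
      · rw [goB, if_neg (by simpa using hb), if_neg h2]
        rw [goB_eq_goA (ls.dropWhile (fun x => x != "\n")) 0 (fun _ => rfl)]
        rw [show goA n (l :: ls) = goA 0 ls from by simp [goA, hb, h2]]
        exact (goA_skip ls).symm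
  termination_by file _ _ => file.length
  decreasing_by
    all_goals exact Nat.lt_succ_of_le (ls.length_dropWhile_le _)

-- ===== VERDICT (by name: the statement is the Claim_ definition above) =====
theorem find_first_csv_line_py_spec : Claim_equal_find_first_csv_line_py := by
  intro file _ _
  unfold Spec_find_first_csv_line_py find_first_csv_line_py find_first_csv_line_py_alt
  rw [goB_eq_goA file 0 (fun _ => rfl)]
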